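-- pv_equiv track=rewrite | github.com/Parsnip113/ThesisTopicSelection | font_subset.py | analyze_chars
-- ===== SOURCE A (Python) =====
-- import unicodedata
--
-- def categorize_char(char):
--     """对字符进行分类"""
--     category = unicodedata.category(char)
--     # Lo: Letter - Other (包括汉字)
--     # Ll: Letter - Lowercase
--     # Lu: Letter - Uppercase
--     # Nd: Number - Decimal
--     # Po: Punctuation - Other
--     # Ps: Punctuation - Open
--     # Pe: Punctuation - Close
--     # Pd: Punctuation - Dash
--     # Pi: Punctuation - Initial quote
--     # Pf: Punctuation - Final quote
--     # Zs: Separator - Space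
--     # Sm: Symbol - Math
--     # Sc: Symbol - Currency
--     # So: Symbol - Other
--     return category
--
-- def analyze_chars(chars):
--     """分析字符集组成"""
--     analysis = {}
--     for char in chars:
--         category = categorize_char(char)
--         if category not in analysis:
--             analysis[category] = set()
--         analysis[category].add(char)
--     return analysis
-- ===== SOURCE B (Python) =====
-- import unicodedata
--
-- def analyze_chars(chars):
--     """分析字符集组成 — two staged passes: first collect the distinct
--     categories in order of first appearance, then build one whole set
--     per category from the full input."""
--     order = []
--     for ch in chars:
--         k = unicodedata.category(ch)
--         if k not in order:
--             order.append(k)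
--     return {k: {c for c in chars if unicodedata.category(c) == k} for k in order}
-- ===== Notes on version B (the rewrite author's own statement) =====
-- stated objective: alternative
-- what changed: Replaces A's single incremental pass that grows per-category sets inside a dict with two staged passes: a first scan collecting the distinct categories in order of first appearance, then one full-input set comprehension per category.
import Mathlib
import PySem

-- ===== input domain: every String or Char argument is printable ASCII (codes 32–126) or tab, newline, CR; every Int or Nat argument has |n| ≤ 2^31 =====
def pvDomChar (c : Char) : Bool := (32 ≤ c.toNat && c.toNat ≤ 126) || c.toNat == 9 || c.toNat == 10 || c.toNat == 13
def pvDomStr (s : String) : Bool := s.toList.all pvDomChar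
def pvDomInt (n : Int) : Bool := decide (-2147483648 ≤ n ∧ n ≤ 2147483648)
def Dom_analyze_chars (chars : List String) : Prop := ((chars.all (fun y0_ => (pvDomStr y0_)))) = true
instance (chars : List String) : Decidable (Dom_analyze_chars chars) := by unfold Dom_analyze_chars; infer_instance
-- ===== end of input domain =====

-- B replaces A's single incremental dict-building pass by two staged passes:
-- distinct categories in first-appearance order, then one whole set per category.

-- unicodedata.category, tabulated for the ASCII domain (codes 32–126, tab/newline/CR); exact there.
def pyUnicodeCategory (c : Char) : String :=
  let n := c.toNat
  if n = 32 then "Zs"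
  else if 48 ≤ n ∧ n ≤ 57 then "Nd"
  else if 65 ≤ n ∧ n ≤ 90 then "Lu"
  else if 97 ≤ n ∧ n ≤ 122 then "Ll"
  else if n = 36 then "Sc"
  else if n = 40 ∨ n = 91 ∨ n = 123 then "Ps"
  else if n = 41 ∨ n = 93 ∨ n = 125 then "Pe"
  else if n = 43 ∨ n = 60 ∨ n = 61 ∨ n = 62 ∨ n = 124 ∨ n = 126 then "Sm"
  else if n = 45 then "Pd"
  else if n = 94 ∨ n = 96 then "Sk"
  else if n = 95 then "Pc"
  else if n = 9 ∨ n = 10 ∨ n = 13 then "Cc"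
  else "Po"

-- ===== PORT A =====
-- categorize_char: Python raises TypeError unless char is a single character (excluded by Pre_).
def categorize_char (char : String) : String :=
  match char.toList with
  | [c] => pyUnicodeCategory c
  | _ => ""

def analyze_chars (chars : List String) : List (String × List String) :=
  (chars.foldl
    (fun analysis char =>
      let category := categorize_char char
      let analysis :=
        if analysis.contains category then analysis
        else analysis.insert category PySem.Set.empty
      analysis.modify category PySem.Set.empty (fun s => PySem.Set.add s char))
    PySem.Dict.empty).items

-- ===== PORT B =====
-- B calls unicodedata.category directly; same tabulation, B's own helper.
def pvCat (s : String) : String :=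
  match s.toList with
  | [c] => pyUnicodeCategory c
  | _ => ""

-- first staged pass: `order = []; for ch in chars: if category(ch) not in order: order.append(...)`
def pvOrder (acc : List String) : List String → List String
  | [] => acc
  | ch :: rest =>
    let k := pvCat ch
    if acc.contains k then pvOrder acc rest else pvOrder (acc ++ [k]) rest

-- second staged pass: the set comprehension {c for c in chars if category(c) == k}
def pvGroupSet (chars : List String) (k : String) : List String :=
  PySem.Set.ofList (chars.filter (fun c => pvCat c == k))

def analyze_chars_alt (chars : List String) : List (String × List String) :=
  (pvOrder [] chars).map (fun k => (k, pvGroupSet chars k))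

-- ===== PRECONDITION & SPEC =====
-- Pre_ excludes elements that are not single characters: unicodedata.category raises TypeError on them.
def Pre_analyze_chars (chars : List String) : Prop := ∀ s ∈ chars, s.toList.length = 1
instance (chars : List String) : Decidable (Pre_analyze_chars chars) := by unfold Pre_analyze_chars; infer_instance

def pvWitness_analyze_chars : List String := ["a", "A", "a", "1", " ", "!"]

def Spec_analyze_chars (chars : List String) (out : List (String × List String)) : Prop := out = analyze_chars_alt chars
instance (chars : List String) (out : List (String × List String)) : Decidable (Spec_analyze_chars chars out) := by unfold Spec_analyze_chars; infer_instance

-- ===== CLAIM (what is proved, stated in full; the proofs are below) =====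
def Claim_equal_analyze_chars : Prop := ∀ (chars : List String), Dom_analyze_chars chars → Pre_analyze_chars chars → Spec_analyze_chars chars (analyze_chars chars)

-- ===== LEMMAS AND PROOFS =====

lemma pvCat_eq : pvCat = categorize_char := rfl

-- A's two-step body (insert empty if missing, then add) is one Dict.modify.
lemma step_eq (d : PySem.Dict String (List String)) (k c : String) :
    (if d.contains k then d else d.insert k PySem.Set.empty).modify k PySem.Set.empty
        (fun s => PySem.Set.add s c)
      = d.modify k PySem.Set.empty (fun s => PySem.Set.add s c) := by
  by_cases h : d.contains k
  · simp [h]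
  · have h' : d.contains k = false := by simpa using h
    have hg : d.getD k [] = [] := PySem.Dict.getD_of_not_contains d [] h'
    simp [h', PySem.Dict.modify, PySem.Dict.getD_insert_self, PySem.Dict.insert_insert_self,
      hg, PySem.Set.add, PySem.Set.empty]

-- value of the modify-loop at any key
lemma getD_loop (l : List String) (d : PySem.Dict String (List String)) (k : String) :
    (l.foldl (fun d c => d.modify (categorize_char c) PySem.Set.empty
        (fun s => PySem.Set.add s c)) d).getD k PySem.Set.empty
      = PySem.Set.update (d.getD k PySem.Set.empty)
          (l.filter (fun c => categorize_char c == k)) := by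
  induction l generalizing d with
  | nil => rfl
  | cons c l ih =>
    simp only [List.foldl_cons, List.filter_cons, ih]
    rw [PySem.Dict.getD_modify]
    by_cases h : k = categorize_char c
    · simp [h, PySem.Set.update]
    · simp [h, Ne.symm h, PySem.Set.update]

-- B's first pass is the fold of Set.add over the mapped categories.
lemma pvOrder_eq (l : List String) (acc : List String) :
    pvOrder acc l = (l.map categorize_char).foldl PySem.Set.add acc := by
  induction l generalizing acc with
  | nil => rfl
  | cons c l ih =>
    simp only [pvOrder, pvCat_eq, List.map_cons, List.foldl_cons, PySem.Set.add]
    by_cases h : categorize_char c ∈ acc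
    · simp [h, ih]
    · simp [h, ih]

-- ===== VERDICT (by name: the statement is the Claim_ definition above) =====
theorem analyze_chars_spec : Claim_equal_analyze_chars := by
  intro chars _ _
  unfold Spec_analyze_chars analyze_chars analyze_chars_alt pvGroupSet
  have hstep : chars.foldl
      (fun analysis char =>
        let category := categorize_char char
        let analysis :=
          if analysis.contains category then analysis
          else analysis.insert category PySem.Set.empty
        analysis.modify category PySem.Set.empty (fun s => PySem.Set.add s char))
      PySem.Dict.empty
    = chars.foldl (fun d c => d.modify (categorize_char c) PySem.Set.empty
        (fun s => PySem.Set.add s c)) PySem.Dict.empty := by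
    apply PySem.List.foldl_congr_mem
    intro d c _
    exact step_eq d (categorize_char c) c
  rw [hstep]
  set L := chars.foldl (fun d c => d.modify (categorize_char c) PySem.Set.empty
      (fun s => PySem.Set.add s c)) PySem.Dict.empty with hL
  have hnd : L.keys.Nodup := by
    exact PySem.Dict.nodup_keys_foldl_modify_key chars categorize_char PySem.Set.empty
      (fun _ c s => PySem.Set.add s c) PySem.Dict.empty PySem.Dict.nodup_keys_empty
  have hkeys : L.keys = pvOrder [] chars := by
    rw [hL, PySem.Dict.keys_foldl_modify_key, pvOrder_eq]
    simp [PySem.Dict.keys_empty, PySem.Set.update]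
  rw [PySem.Dict.items_eq_map_keys L hnd PySem.Set.empty, hkeys]
  apply List.map_congr_left
  intro k _
  rw [hL, getD_loop]
  simp [pvCat_eq, PySem.Dict.getD_empty, PySem.Set.ofList_eq_foldl, PySem.Set.update,
    PySem.Set.empty]
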